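-- pv_equiv track=rewrite | github.com/nguyeho7/CZ_NER | src/feature_extractor.py | ft_get_type
-- ===== SOURCE A (Python) =====
-- def ft_get_type(*params):
--     token = params[0]
--     output = ""
--     for ch in token:
--         if ch.isalpha():
--             if ch.isupper():
--                 k="A"
--             else:
--                 k="a"
--         elif ch.isdigit():
--             k="N"
--         elif not ch.isalnum():
--             k="."
--         if not output.endswith(k):
--             output += k
--     return "type="+output
-- ===== SOURCE B (Python) =====
-- def ft_get_type(*params):
--     token = params[0]
--
--     def code(ch):
--         if ch.isalpha():
--             return "A" if ch.isupper() else "a"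
--         if ch.isdigit():
--             return "N"
--         return "."
--
--     out = []
--     i, n = 0, len(token)
--     while i < n:
--         c = code(token[i])
--         out.append(c)
--         i += 1
--         while i < n and code(token[i]) == c:
--             i += 1
--     return "type=" + "".join(out)
-- ===== Notes on version B (the rewrite author's own statement) =====
-- stated objective: alternative
-- what changed: A emits per character inside a single loop, suppressing duplicates online with output.endswith and a carried code variable; B is a two-pointer run scanner: an outer loop classifies the run's first character and appends its code once, and an inner loop advances the index past the whole run of equally-coded characters.
import Mathlib
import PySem

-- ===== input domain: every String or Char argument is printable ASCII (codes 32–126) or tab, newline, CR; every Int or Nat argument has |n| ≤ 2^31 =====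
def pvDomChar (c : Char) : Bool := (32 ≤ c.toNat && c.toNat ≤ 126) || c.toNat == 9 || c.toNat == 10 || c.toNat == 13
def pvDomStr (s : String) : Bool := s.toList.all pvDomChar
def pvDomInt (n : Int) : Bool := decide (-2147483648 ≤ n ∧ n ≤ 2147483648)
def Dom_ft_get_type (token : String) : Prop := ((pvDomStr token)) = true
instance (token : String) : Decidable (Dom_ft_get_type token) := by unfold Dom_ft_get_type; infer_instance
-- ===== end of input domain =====

-- B replaces A's online endswith-based duplicate suppression by a two-pointer run scanner:
-- emit one code per run, skip the rest of the run (objective: alternative, same cost).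

-- ===== PORT A =====
-- state = (output, k); k is an Option because Python's k is unassigned before the first
-- classified char (the `none` fallthrough is unreachable for ASCII input, where the
-- if-chain always assigns k; PySem's predicates are exact on the ASCII domain).
def ft_get_type (token : String) : String :=
  let st := token.toList.foldl
    (fun (st : List Char × Option Char) ch =>
      let k : Option Char :=
        if PySem.Chars.isalpha ch then
          (if PySem.Chars.isupper ch then some 'A' else some 'a')
        else if PySem.Chars.isdigit ch then some 'N'
        else if !(PySem.Chars.isalnum ch) then some '.'
        else st.2
      match k with
      | some c => if PySem.Chars.endswith st.1 [c] then (st.1, k) else (st.1 ++ [c], k)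
      | none => (st.1, none))
    ([], none)
  String.mk ("type=".toList ++ st.1)

-- ===== PORT B =====
def pvCode (ch : Char) : Char :=
  if PySem.Chars.isalpha ch then (if PySem.Chars.isupper ch then 'A' else 'a')
  else if PySem.Chars.isdigit ch then 'N'
  else '.'

-- outer while loop of B; the inner `while code(token[i]) == c: i += 1` is the dropWhile
def pvRuns : List Char → List Char
  | [] => []
  | ch :: rest =>
    let c := pvCode ch
    c :: pvRuns (rest.dropWhile (fun x => pvCode x == c))
termination_by cs => cs.length
decreasing_by
  exact Nat.lt_succ_of_le (List.length_dropWhile_le _ _)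

def ft_get_type_alt (token : String) : String :=
  String.mk ("type=".toList ++ pvRuns token.toList)

-- ===== PRECONDITION & SPEC =====
def Spec_ft_get_type (token : String) (out : String) : Prop := out = ft_get_type_alt token
instance (token : String) (out : String) : Decidable (Spec_ft_get_type token out) := by unfold Spec_ft_get_type; infer_instance

-- ===== CLAIM (what is proved, stated in full; the proofs are below) =====
def Claim_equal_ft_get_type : Prop := ∀ (token : String), Dom_ft_get_type token → Spec_ft_get_type token (ft_get_type token)

-- ===== LEMMAS AND PROOFS =====

-- proof-side run compression: drop each code equal to the previous one
def pvDD (prev : Option Char) : List Char → List Char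
  | [] => []
  | c :: cs => if prev = some c then pvDD (some c) cs else c :: pvDD (some c) cs

lemma pvEndswith_last (out : List Char) (c : Char) :
    PySem.Chars.endswith out [c] = (out.getLast? == some c) := by
  rw [Bool.eq_iff_iff, PySem.Chars.endswith_iff, beq_iff_eq]
  constructor
  · rintro ⟨t, rfl⟩; simp
  · intro h
    rcases List.eq_nil_or_concat out with rfl | ⟨t, x, rfl⟩
    · simp at h
    · simp at h; exact ⟨t, by simp [h]⟩

lemma pvA_fold (cs : List Char) : ∀ (out : List Char) (k : Option Char),
    (cs.foldl
      (fun (st : List Char × Option Char) ch =>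
        let k : Option Char :=
          if PySem.Chars.isalpha ch then
            (if PySem.Chars.isupper ch then some 'A' else some 'a')
          else if PySem.Chars.isdigit ch then some 'N'
          else if !(PySem.Chars.isalnum ch) then some '.'
          else st.2
        match k with
        | some c => if PySem.Chars.endswith st.1 [c] then (st.1, k) else (st.1 ++ [c], k)
        | none => (st.1, none))
      (out, k)).1 = out ++ pvDD out.getLast? (cs.map pvCode) := by
  induction cs with
  | nil => intro out k; simp [pvDD]
  | cons ch cs ih =>
    intro out k
    have hcls : (if PySem.Chars.isalpha ch then
          (if PySem.Chars.isupper ch then some 'A' else some 'a')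
        else if PySem.Chars.isdigit ch then some 'N'
        else if !(PySem.Chars.isalnum ch) then some '.'
        else k) = some (pvCode ch) := by
      unfold pvCode PySem.Chars.isalnum
      by_cases h1 : PySem.Chars.isalpha ch <;> by_cases h2 : PySem.Chars.isdigit ch <;>
        by_cases h3 : PySem.Chars.isupper ch <;> simp [h1, h2, h3]
    simp only [List.foldl_cons, List.map_cons, pvDD, hcls]
    rw [pvEndswith_last]
    by_cases h : out.getLast? = some (pvCode ch)
    · simp only [h, beq_self_eq_true, if_true]
      rw [ih]; rw [h]
    · have hb : (out.getLast? == some (pvCode ch)) = false := by simp [h]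
      simp only [hb, if_neg h, Bool.false_eq_true, if_false]
      rw [ih]
      simp

-- skipping a run then deduping = deduping with the run's code as previous
lemma pvDD_runs_aux : ∀ (n : ℕ) (cs : List Char), cs.length ≤ n → ∀ (c : Char),
    pvDD (some c) (cs.map pvCode) = pvRuns (cs.dropWhile (fun x => pvCode x == c)) := by
  intro n
  induction n with
  | zero =>
    intro cs h c
    have : cs = [] := List.eq_nil_of_length_eq_zero (Nat.le_zero.mp h)
    subst this; simp [pvDD, pvRuns]
  | succ n ih =>
    intro cs h c
    cases cs with
    | nil => simp [pvDD, pvRuns]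
    | cons x xs =>
      simp only [List.map_cons, pvDD, List.dropWhile_cons]
      by_cases hx : pvCode x = c
      · simp only [hx, beq_self_eq_true, if_true]
        exact ih xs (Nat.le_of_succ_le_succ h) c
      · have hb : (pvCode x == c) = false := by simp [hx]
        simp only [hb, Bool.false_eq_true, if_false, if_neg (fun he => hx (Option.some.inj he).symm)]
        rw [pvRuns]
        have := ih xs (Nat.le_of_succ_le_succ h) (pvCode x)
        simp only [this]

lemma pvDD_eq_runs (cs : List Char) : pvDD none (cs.map pvCode) = pvRuns cs := by
  cases cs with
  | nil => simp [pvDD, pvRuns]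
  | cons x xs =>
    rw [List.map_cons, pvDD, if_neg (by simp), pvRuns]
    exact congrArg (pvCode x :: ·) (pvDD_runs_aux xs.length xs le_rfl (pvCode x))

-- ===== VERDICT (by name: the statement is the Claim_ definition above) =====
theorem ft_get_type_spec : Claim_equal_ft_get_type := by
  intro token _
  unfold Spec_ft_get_type ft_get_type ft_get_type_alt
  simp only [pvA_fold, List.getLast?_nil, List.nil_append, pvDD_eq_runs]
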